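-- pv_equiv track=rewrite | github.com/sjerkovic/Bioinformatics-specialization | b2week3.py | PeptideToCode
-- ===== SOURCE A (Python) =====
-- import itertools
--
-- def PeptideToCode(String, GeneticCode):
--     reverse_aa_dict = {}
--     for k, v in GeneticCode.items():
--         reverse_aa_dict[v] = reverse_aa_dict.get(v, [])
--         reverse_aa_dict[v].append(k)
--     code = []
--     for i in String:
--         code.append(reverse_aa_dict[i])
--
--     l = list(itertools.product(*code))
--     result = []
--     for i in l:
--         result.append(''.join(i))
--     return result
-- ===== SOURCE B (Python) =====
-- def PeptideToCode(String, GeneticCode):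
--     # Same reverse dictionary (amino acid -> list of codons, in GeneticCode order).
--     reverse_aa_dict = {}
--     for k, v in GeneticCode.items():
--         reverse_aa_dict[v] = reverse_aa_dict.get(v, [])
--         reverse_aa_dict[v].append(k)
--     # Iteratively extend prefixes, one peptide position at a time, instead of
--     # materialising all codon lists and taking itertools.product over them.
--     result = ['']
--     for aa in String:
--         codons = reverse_aa_dict[aa]
--         result = [prefix + codon for prefix in result for codon in codons]
--     return result
-- ===== Notes on version B (the rewrite author's own statement) =====
-- stated objective: alternative
-- what changed: Replaces collecting all codon lists and calling itertools.product (materialising tuples, then joining each) with an iterative prefix accumulator: start from [''] and extend every prefix by each codon of the next peptide position, which reproduces product's last-position-fastest order without tuples or itertools.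
import Mathlib
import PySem

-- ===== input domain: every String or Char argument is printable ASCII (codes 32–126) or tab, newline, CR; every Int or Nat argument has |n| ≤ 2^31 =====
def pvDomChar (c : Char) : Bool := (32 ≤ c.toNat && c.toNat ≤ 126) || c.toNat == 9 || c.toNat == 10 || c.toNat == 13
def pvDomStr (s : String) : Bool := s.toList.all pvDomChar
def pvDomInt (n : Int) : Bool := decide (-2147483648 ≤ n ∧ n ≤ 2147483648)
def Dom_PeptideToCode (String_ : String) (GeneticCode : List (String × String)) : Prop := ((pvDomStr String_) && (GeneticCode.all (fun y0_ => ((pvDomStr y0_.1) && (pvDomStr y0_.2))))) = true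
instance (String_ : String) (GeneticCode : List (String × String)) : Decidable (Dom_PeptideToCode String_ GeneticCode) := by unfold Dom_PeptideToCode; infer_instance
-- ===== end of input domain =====

-- B replaces itertools.product over the collected codon lists by an iterative
-- prefix accumulator (alternative decomposition, same output in the same order).

-- Shared helper (the reverse-dict loop is textually identical in Source A and Source B):
-- reverse_aa_dict[v] = reverse_aa_dict.get(v, []); reverse_aa_dict[v].append(k)
def pvRevDict (GeneticCode : List (String × String)) : PySem.Dict String (List String) :=
  GeneticCode.foldl (fun d p => d.insert p.2 (d.getD p.2 [] ++ [p.1])) PySem.Dict.empty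

-- ===== PORT A =====
-- itertools.product(*code): tuples as List String, last position varies fastest
def pvProduct (code : List (List String)) : List (List String) :=
  code.foldr (fun xs acc => xs.flatMap (fun x => acc.map (fun t => x :: t))) [[]]

def PeptideToCode (String_ : String) (GeneticCode : List (String × String)) : List String :=
  let reverse_aa_dict := pvRevDict GeneticCode
  -- for i in String: code.append(reverse_aa_dict[i])  (KeyError is excluded by Pre_)
  let code := String_.toList.map (fun i => reverse_aa_dict.getD (String.ofList [i]) [])
  let l := pvProduct code
  -- for i in l: result.append(''.join(i))
  l.map (fun i => PySem.Str.join "" i)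

-- ===== PORT B =====
def PeptideToCode_alt (String_ : String) (GeneticCode : List (String × String)) : List String :=
  let reverse_aa_dict := pvRevDict GeneticCode
  String_.toList.foldl
    (fun result aa =>
      result.flatMap (fun pre =>
        (reverse_aa_dict.getD (String.ofList [aa]) []).map (fun codon => pre ++ codon)))
    [""]

-- ===== PRECONDITION & SPEC =====
-- Pre_ excludes exactly the inputs on which Python A raises KeyError: a peptide
-- character that is not a value of GeneticCode (Python B raises there too).
def Pre_PeptideToCode (String_ : String) (GeneticCode : List (String × String)) : Prop :=
  (String_.toList.all (fun c => GeneticCode.any (fun p => p.2 == String.ofList [c]))) = true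
instance (String_ : String) (GeneticCode : List (String × String)) : Decidable (Pre_PeptideToCode String_ GeneticCode) := by unfold Pre_PeptideToCode; infer_instance

def pvWitness_PeptideToCode : String × (List (String × String)) :=
  ("KA", [("AAA", "K"), ("AAG", "K"), ("GCU", "A")])

def Spec_PeptideToCode (String_ : String) (GeneticCode : List (String × String)) (out : List String) : Prop := out = PeptideToCode_alt String_ GeneticCode
instance (String_ : String) (GeneticCode : List (String × String)) (out : List String) : Decidable (Spec_PeptideToCode String_ GeneticCode out) := by unfold Spec_PeptideToCode; infer_instance

-- ===== CLAIM (what is proved, stated in full; the proofs are below) =====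
def Claim_equal_PeptideToCode : Prop := ∀ (String_ : String) (GeneticCode : List (String × String)), Dom_PeptideToCode String_ GeneticCode → Pre_PeptideToCode String_ GeneticCode → Spec_PeptideToCode String_ GeneticCode (PeptideToCode String_ GeneticCode)

-- ===== LEMMAS AND PROOFS =====

theorem pv_flatten_intersperse_nil (ts : List (List Char)) :
    (List.intersperse ([] : List Char) ts).flatten = ts.flatten := by
  induction ts with
  | nil => rfl
  | cons a ts ih =>
    cases ts with
    | nil => rfl
    | cons b r => simpa [List.intersperse] using ih

theorem pv_join_empty_cons (x : String) (t : List String) :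
    PySem.Str.join "" (x :: t) = x ++ PySem.Str.join "" t := by
  simp [PySem.Str.join, PySem.Chars.join, List.intercalate, pv_flatten_intersperse_nil]

-- loop invariant of B's accumulator: extending every prefix position by position
-- equals appending each joined product tuple of the remaining positions
theorem pv_main (look : Char → List String) (cs : List Char) : ∀ (res : List String),
    cs.foldl (fun result aa => result.flatMap (fun pre => (look aa).map (fun codon => pre ++ codon))) res
      = res.flatMap (fun pre => ((pvProduct (cs.map look)).map (fun i => PySem.Str.join "" i)).map (fun s => pre ++ s)) := by
  induction cs with
  | nil => intro res; simp [pvProduct, PySem.Str.join, PySem.Chars.join, List.intercalate]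
  | cons c cs ih =>
    intro res
    simp only [List.foldl_cons, ih, pvProduct, List.map_cons, List.foldr_cons]
    simp only [List.flatMap_assoc, List.map_flatMap, List.flatMap_map, List.map_map,
      Function.comp_def, pv_join_empty_cons]
    simp [String.append_assoc]

-- ===== VERDICT (by name: the statement is the Claim_ definition above) =====
theorem PeptideToCode_spec : Claim_equal_PeptideToCode := by
  intro S GC _ _
  unfold Spec_PeptideToCode PeptideToCode PeptideToCode_alt
  rw [pv_main (fun i => (pvRevDict GC).getD (String.ofList [i]) []) S.toList [""]]
  simp
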